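-- pv_equiv track=rewrite | github.com/SpaceTimeNarratives/demo | functions.py | combine_multi_tokens
-- ===== SOURCE A (Python) =====
-- combine = lambda x, y: (x[0], x[1], x[2]+' '+y[2], x[3])
--
-- def combine_multi_tokens(a_list):
--   new_list = [a_list.pop()]
--   while a_list:
--     last = a_list.pop()
--     if new_list[-1][0] - last[0] == 1:
--       new_list.append(combine(last, new_list.pop()))
--     else:
--       new_list.append(last)
--   return sorted(new_list)
-- ===== SOURCE B (Python) =====
-- def combine_multi_tokens(a_list):
--     runs = []
--     cur = []
--     for t in a_list:
--         if cur and t[0] == cur[-1][0] + 1: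
--             cur.append(t)
--         else:
--             if cur:
--                 runs.append(cur)
--             cur = [t]
--     if cur:
--         runs.append(cur)
--     res = []
--     for g in runs:
--         if len(g) == 1:
--             res.append(g[0])
--         else:
--             h = g[0]
--             res.append((h[0], h[1], ' '.join(t[2] for t in g), h[3]))
--     return sorted(res)
-- ===== Notes on version B (the rewrite author's own statement) =====
-- stated objective: simpler
-- what changed: A pops the list from the right and repeatedly merges or pushes on a stack whose top it inspects; B makes one forward pass that cuts the list into maximal consecutive-index runs and emits each run once (singletons unchanged, longer runs joined with ' '), then sorts; B also does not mutate the argument list, which A empties in place.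
-- outside the precondition, e.g. on combine_multi_tokens([]): A raises IndexError, B returns []
import Mathlib
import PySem

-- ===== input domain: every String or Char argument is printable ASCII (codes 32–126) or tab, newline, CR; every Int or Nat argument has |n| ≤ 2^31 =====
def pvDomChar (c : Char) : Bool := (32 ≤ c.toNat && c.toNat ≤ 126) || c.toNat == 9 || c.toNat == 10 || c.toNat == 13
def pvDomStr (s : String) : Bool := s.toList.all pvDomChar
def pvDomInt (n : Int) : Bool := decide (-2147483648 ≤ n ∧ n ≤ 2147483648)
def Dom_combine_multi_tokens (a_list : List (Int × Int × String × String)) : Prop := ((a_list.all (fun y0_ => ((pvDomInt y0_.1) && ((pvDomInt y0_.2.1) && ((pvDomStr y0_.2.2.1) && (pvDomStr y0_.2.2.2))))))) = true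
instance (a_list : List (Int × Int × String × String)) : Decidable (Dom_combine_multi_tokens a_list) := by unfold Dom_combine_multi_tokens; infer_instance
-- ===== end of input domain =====

-- B replaces A's backward pop-loop (a stack whose top token is repeatedly merged or pushed) by one
-- forward pass that collects maximal consecutive-index runs and emits each run once; objective:
-- simpler.  Equivalence is about the RETURN value only: Python A empties its argument in place
-- (a_list.pop() until empty), B does not mutate it.

-- Python sorts these 4-tuples lexicographically: identity key into the lexicographic product order
def pvSortKey (t : Int × Int × String × String) : Lex (Int × Lex (Int × Lex (String × String))) :=
  toLex (t.1, toLex (t.2.1, toLex (t.2.2.1, t.2.2.2)))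

-- ===== PORT A =====
-- combine = lambda x, y: (x[0], x[1], x[2]+' '+y[2], x[3]);  str '+' ported exactly on List Char
def pvCombine (x y : Int × Int × String × String) : Int × Int × String × String :=
  (x.1, x.2.1, String.ofList ((x.2.2.1.toList ++ [' ']) ++ y.2.2.1.toList), x.2.2.2)

-- one iteration of A's while loop: the stack new_list is kept top-first (Python appends at the end)
def pvStep (new_list : List (Int × Int × String × String)) (last : Int × Int × String × String) :
    List (Int × Int × String × String) :=
  match new_list with
  | top :: rest => if top.1 - last.1 == 1 then pvCombine last top :: rest else last :: new_list
  | [] => [last]   -- unreachable: the stack starts nonempty and never shrinks to []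

def combine_multi_tokens (a_list : List (Int × Int × String × String)) : List (Int × Int × String × String) :=
  match a_list.reverse with            -- a_list.pop() pops from the right: traverse the reverse
  | [] => []                           -- Python raises IndexError here (excluded by Pre_)
  | first :: rest =>
      let new_list := rest.foldl pvStep [first]
      PySem.List.sorted new_list.reverse pvSortKey false

-- ===== PORT B =====
-- Source B's forward loop, from the point where cur = [..., prev] is nonempty: extend the current run
-- while the next index is prev's + 1, otherwise close it and start a fresh one
def pvRunsGo (cur : List (Int × Int × String × String)) (prev : Int × Int × String × String) :
    List (Int × Int × String × String) → List (List (Int × Int × String × String))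
  | [] => [cur]
  | t :: rest =>
      if t.1 == prev.1 + 1 then pvRunsGo (cur ++ [t]) t rest
      else cur :: pvRunsGo [t] t rest

def pvRuns : List (Int × Int × String × String) → List (List (Int × Int × String × String))
  | [] => []
  | t :: rest => pvRunsGo [t] t rest

-- what Source B appends for one run: the token itself for a singleton, else the merged 4-tuple
def pvEmit (g : List (Int × Int × String × String)) : Int × Int × String × String :=
  match g with
  | [h] => h
  | h :: _ => (h.1, h.2.1, PySem.Str.join " " (g.map (fun t => t.2.2.1)), h.2.2.2)
  | [] => (0, 0, "", "")   -- unreachable: runs are nonempty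

def combine_multi_tokens_alt (a_list : List (Int × Int × String × String)) : List (Int × Int × String × String) :=
  PySem.List.sorted ((pvRuns a_list).map pvEmit) pvSortKey false

-- ===== PRECONDITION & SPEC =====
-- Pre_ excludes only the empty list, on which Python A raises IndexError (a_list.pop() on [])
def Pre_combine_multi_tokens (a_list : List (Int × Int × String × String)) : Prop := a_list ≠ []
instance (a_list : List (Int × Int × String × String)) : Decidable (Pre_combine_multi_tokens a_list) := by unfold Pre_combine_multi_tokens; infer_instance
def pvWitness_combine_multi_tokens : (List (Int × Int × String × String)) :=
  [(3, 0, "new", "N"), (1, 7, "a", "X"), (2, 7, "b", "Y")]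

def Spec_combine_multi_tokens (a_list : List (Int × Int × String × String)) (out : List (Int × Int × String × String)) : Prop := out = combine_multi_tokens_alt a_list
instance (a_list : List (Int × Int × String × String)) (out : List (Int × Int × String × String)) : Decidable (Spec_combine_multi_tokens a_list out) := by unfold Spec_combine_multi_tokens; infer_instance

-- ===== CLAIM (what is proved, stated in full; the proofs are below) =====
def Claim_equal_combine_multi_tokens : Prop := ∀ (a_list : List (Int × Int × String × String)), Dom_combine_multi_tokens a_list → Pre_combine_multi_tokens a_list → Spec_combine_multi_tokens a_list (combine_multi_tokens a_list)
-- ===== LEMMAS AND PROOFS =====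

theorem pvSortKey_injective : Function.Injective pvSortKey := by
  intro a b h
  obtain ⟨a1, a2, a3, a4⟩ := a
  obtain ⟨b1, b2, b3, b4⟩ := b
  simpa [pvSortKey, Prod.ext_iff] using h

-- B's run list before sorting, the quantity A's stack equals
def pvG (l : List (Int × Int × String × String)) : List (Int × Int × String × String) :=
  (pvRuns l).map pvEmit

theorem pvRunsGo_cons (l : List (Int × Int × String × String))
    (cur : List (Int × Int × String × String)) (prev x : Int × Int × String × String) :
    pvRunsGo (x :: cur) prev l
      = (x :: (pvRunsGo cur prev l).headI) :: (pvRunsGo cur prev l).tail := by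
  induction l generalizing cur prev with
  | nil => simp [pvRunsGo]
  | cons t rest ih =>
      simp only [pvRunsGo]
      split
      · rw [show x :: cur ++ [t] = x :: (cur ++ [t]) from rfl, ih]
      · simp

theorem pvEmit_head (h : Int × Int × String × String)
    (g : List (Int × Int × String × String)) :
    (pvEmit (h :: g)).1 = h.1 ∧ (pvEmit (h :: g)).2.1 = h.2.1 ∧ (pvEmit (h :: g)).2.2.2 = h.2.2.2 := by
  cases g <;> simp [pvEmit]

theorem pvEmit_cons_cons (t h : Int × Int × String × String)
    (r : List (Int × Int × String × String)) :
    pvEmit (t :: h :: r) = pvCombine t (pvEmit (h :: r)) := by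
  cases r with
  | nil =>
      simp [pvEmit, pvCombine, PySem.Str.join, PySem.Chars.join, List.intercalate]
  | cons y ys =>
      simp only [pvEmit, pvCombine, PySem.Str.join, PySem.Chars.join, List.map]
      refine Prod.ext rfl (Prod.ext rfl (Prod.ext ?_ rfl))
      simp [List.intercalate, String.toList_ofList]

theorem pvStep_G (t : Int × Int × String × String)
    (l : List (Int × Int × String × String)) (hl : l ≠ []) :
    pvStep (pvG l) t = pvG (t :: l) := by
  obtain ⟨h, l', rfl⟩ := List.exists_cons_of_ne_nil hl
  have hR : pvRuns (h :: l') = (h :: (pvRunsGo [] h l').headI) :: (pvRunsGo [] h l').tail := by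
    simpa [pvRuns] using pvRunsGo_cons l' [] h h
  set G0 := (pvRunsGo [] h l').headI with hG0
  set gs := (pvRunsGo [] h l').tail with hgs
  have hRh : pvRunsGo [h] h l' = (h :: G0) :: gs := hR
  have hRt : pvRuns (t :: h :: l') = if h.1 == t.1 + 1
      then (t :: h :: G0) :: gs else [t] :: ((h :: G0) :: gs) := by
    simp only [pvRuns, pvRunsGo]
    split
    · rw [show [t] ++ [h] = [t, h] from rfl, pvRunsGo_cons l' [h] h t, hRh]; rfl
    · rw [hRh]
  have hhead1 : (pvEmit (h :: G0)).1 = h.1 := (pvEmit_head h G0).1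
  by_cases hc : h.1 = t.1 + 1
  · simp only [pvG, hR, hRt, beq_iff_eq, hc, if_true, List.map, pvStep]
    rw [if_pos (show (pvEmit (h :: G0)).1 - t.1 = 1 by rw [hhead1]; omega)]
    rw [pvEmit_cons_cons]
  · have hcond2 : (h.1 == t.1 + 1) = false := by simp; omega
    simp only [pvG, hRt, hcond2, Bool.false_eq_true, if_false, List.map, hR, pvStep]
    rw [if_neg (show ¬((pvEmit (h :: G0)).1 - t.1 == 1) = true by rw [hhead1]; simp; omega)]
    simp [pvEmit]

theorem pvFold_G (front suf : List (Int × Int × String × String)) (hs : suf ≠ []) :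
    front.reverse.foldl pvStep (pvG suf) = pvG (front ++ suf) := by
  induction front with
  | nil => rfl
  | cons x ft ih =>
      rw [show (x :: ft).reverse = ft.reverse ++ [x] by simp, List.foldl_append, ih]
      simp only [List.foldl]
      rw [pvStep_G x (ft ++ suf) (by simp [hs])]
      rfl

theorem pvStack_eq_G (a_list : List (Int × Int × String × String)) (f : Int × Int × String × String)
    (rest : List (Int × Int × String × String)) (h : a_list.reverse = f :: rest) :
    rest.foldl pvStep [f] = pvG a_list := by
  have hG1 : pvG [f] = [f] := by simp [pvG, pvRuns, pvRunsGo, pvEmit]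
  have ha : a_list = rest.reverse ++ [f] := by
    have := congrArg List.reverse h
    simpa using this
  have hfold := pvFold_G rest.reverse [f] (by simp)
  rw [List.reverse_reverse, hG1] at hfold
  rw [ha]
  exact hfold

-- ===== VERDICT (by name: the statement is the Claim_ definition above) =====
theorem combine_multi_tokens_spec : Claim_equal_combine_multi_tokens := by
  intro a_list _ hpre
  unfold Spec_combine_multi_tokens combine_multi_tokens combine_multi_tokens_alt
  cases hrev : a_list.reverse with
  | nil => exact absurd (by simpa using congrArg List.reverse hrev) hpre
  | cons f rest =>
      simp only
      rw [pvStack_eq_G a_list f rest hrev]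
      exact PySem.List.sorted_eq_sorted_of_perm _ _ pvSortKey pvSortKey_injective
        (List.reverse_perm _)
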